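-- pv_equiv track=rewrite | github.com/spidey000/plane_spotter | utils/image_finder.py | _extract_image_src
-- ===== SOURCE A (Python) =====
-- def _extract_image_src(img_tag) -> str | None:
--     if img_tag is None:
--         return None
--
--     for attr in ("src", "data-src", "data-lazy-src"):
--         value = img_tag.get(attr)
--         if value:
--             return value
--
--     srcset = img_tag.get("srcset")
--     if not srcset:
--         return None
--
--     candidates: list[tuple[int, str]] = []
--     for item in srcset.split(","):
--         parts = item.strip().split()
--         if not parts:
--             continue
--         candidate_url = parts[0]
--         width = 0
--         if len(parts) > 1 and parts[1].endswith("w"):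
--             try:
--                 width = int(parts[1][:-1])
--             except ValueError:
--                 width = 0
--         candidates.append((width, candidate_url))
--
--     if not candidates:
--         return None
--
--     candidates.sort(reverse=True)
--     return candidates[0][1]
-- ===== SOURCE B (Python) =====
-- def _extract_image_src(img_tag) -> str | None:
--     if img_tag is None:
--         return None
--
--     # first truthy attribute via an or-chain instead of a loop
--     value = (img_tag.get("src")
--              or img_tag.get("data-src")
--              or img_tag.get("data-lazy-src"))
--     if value:
--         return value
--
--     srcset = img_tag.get("srcset")
--     if not srcset:
--         return None
--
--     best = _best(srcset.split(","))
--     return best[1] if best is not None else None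
--
--
-- def _parse(item):
--     """One srcset item -> (width, url), or None if the item is blank."""
--     parts = item.strip().split()
--     if not parts:
--         return None
--     width = 0
--     if len(parts) > 1 and parts[1].endswith("w"):
--         try:
--             width = int(parts[1][:-1])
--         except ValueError:
--             width = 0
--     return (width, parts[0])
--
--
-- def _best(items):
--     """Maximal (width, url) pair, by back-to-front structural recursion; no list, no sort."""
--     if not items:
--         return None
--     rest = _best(items[1:])
--     head = _parse(items[0])
--     if head is None:
--         return rest
--     if rest is None or head >= rest:
--         return head
--     return rest
-- ===== Notes on version B (the rewrite author's own statement) =====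
-- stated objective: alternative
-- what changed: Replaces A's attribute loop by an or-chain and A's build-candidates-list-then-sort(reverse=True)-take-head selection by a back-to-front structural recursion that keeps only the maximal (width, url) pair; no intermediate list and no sort.
import Mathlib
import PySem

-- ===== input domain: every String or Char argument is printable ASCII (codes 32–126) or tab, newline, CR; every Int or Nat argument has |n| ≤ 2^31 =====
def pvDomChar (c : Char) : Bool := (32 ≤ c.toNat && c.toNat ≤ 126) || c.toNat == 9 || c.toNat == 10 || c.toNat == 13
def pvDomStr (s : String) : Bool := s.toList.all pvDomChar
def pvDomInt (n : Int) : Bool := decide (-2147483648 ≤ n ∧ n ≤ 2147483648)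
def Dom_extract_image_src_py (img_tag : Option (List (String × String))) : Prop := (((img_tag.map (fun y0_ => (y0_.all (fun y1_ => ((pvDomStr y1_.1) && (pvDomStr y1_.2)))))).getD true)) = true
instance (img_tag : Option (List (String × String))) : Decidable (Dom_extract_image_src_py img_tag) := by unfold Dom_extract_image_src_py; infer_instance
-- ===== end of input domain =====

-- B replaces A's attribute loop by an or-chain and A's candidates-list + sort(reverse=True) + head
-- by a back-to-front recursive maximum over the srcset items: no intermediate list, no sort.

-- ===== PORT A =====
-- dict.get(k): first match in the association list
def pvDictGet (d : List (String × String)) (k : String) : Option String :=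
  (d.find? (fun p => p.1 == k)).map (·.2)

-- A's attribute-fallback loop: return the first truthy (non-empty) value among the attrs
def pvFirstAttr (d : List (String × String)) : List String → Option String
  | [] => none
  | a :: rest =>
    match pvDictGet d a with
    | some v => if v = "" then pvFirstAttr d rest else some v
    | none => pvFirstAttr d rest

-- srcset.split(",") is ported as (PySem.Str.split? srcset ",").getD [] — the separator "," is never empty so split? is always some
-- one srcset item → (width, url); none when the item has no words
-- parts[1][:-1] is ported by hand as String.ofList (dropLast ∘ toList) — exact: the slice s[:-1] drops the last character (or is "" on "")
def pvParseItem (item : String) : Option (Int × String) :=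
  match PySem.Str.split₀ (PySem.Str.strip item) with
  | [] => none
  | url :: rest =>
    let width : Int :=
      match rest with
      | [] => 0
      | p1 :: _ =>
        if PySem.Str.endswith p1 "w" then
          (PySem.Int.ofStr? (String.ofList p1.toList.dropLast)).getD 0
        else 0
    some (width, url)

def extract_image_src_py (img_tag : Option (List (String × String))) : Option String :=
  match img_tag with
  | none => none
  | some d =>
    match pvFirstAttr d ["src", "data-src", "data-lazy-src"] with
    | some v => some v
    | none =>
      match pvDictGet d "srcset" with
      | none => none
      | some srcset =>
        if srcset = "" then none
        else
          let candidates : List (Int × String) :=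
            (((PySem.Str.split? srcset ",").getD [])).foldl
              (fun acc item =>
                match pvParseItem item with
                | none => acc
                | some c => acc ++ [c]) []
          if candidates = [] then none
          else
            match PySem.List.sorted2 candidates Prod.fst Prod.snd true with
            | [] => none
            | (_, u) :: _ => some u

-- ===== PORT B =====
-- Python truthiness of an optional string: None and "" are falsy
def pvTruthy (v : Option String) : Bool :=
  match v with
  | none => false
  | some s => !(s == "")

-- Python's 'x or y' on optional strings
def pvOr (a b : Option String) : Option String := if pvTruthy a then a else b

-- Source B's _parse: one srcset item → (width, url), none if the item is blank
def pvParse (item : String) : Option (Int × String) :=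
  match PySem.Str.split₀ (PySem.Str.strip item) with
  | [] => none
  | url :: rest =>
    let width : Int :=
      match rest with
      | [] => 0
      | p1 :: _ =>
        if PySem.Str.endswith p1 "w" then
          (PySem.Int.ofStr? (String.ofList p1.toList.dropLast)).getD 0
        else 0
    some (width, url)

-- Source B's _best: maximal (width, url) pair by back-to-front structural recursion
-- 'head >= rest' on Python tuples is 'rest.1 < head.1 ∨ (rest.1 = head.1 ∧ rest.2 ≤ head.2)'
def pvBest : List String → Option (Int × String)
  | [] => none
  | item :: items =>
    let rest := pvBest items
    match pvParse item with
    | none => rest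
    | some head =>
      match rest with
      | none => some head
      | some r => if r.1 < head.1 ∨ (r.1 = head.1 ∧ r.2 ≤ head.2) then some head else some r

def extract_image_src_py_alt (img_tag : Option (List (String × String))) : Option String :=
  match img_tag with
  | none => none
  | some d =>
    let value := pvOr (pvOr ((PySem.Dict.mk d).get? "src") ((PySem.Dict.mk d).get? "data-src"))
      ((PySem.Dict.mk d).get? "data-lazy-src")
    if pvTruthy value then value
    else
      match (PySem.Dict.mk d).get? "srcset" with
      | none => none
      | some srcset =>
        if srcset = "" then none
        else
          match pvBest ((PySem.Str.split? srcset ",").getD []) with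
          | some best => some best.2
          | none => none

-- ===== PRECONDITION & SPEC =====
def Spec_extract_image_src_py (img_tag : Option (List (String × String))) (out : Option String) : Prop := out = extract_image_src_py_alt img_tag
instance (img_tag : Option (List (String × String))) (out : Option String) : Decidable (Spec_extract_image_src_py img_tag out) := by unfold Spec_extract_image_src_py; infer_instance

-- ===== CLAIM (what is proved, stated in full; the proofs are below) =====
def Claim_equal_extract_image_src_py : Prop := ∀ (img_tag : Option (List (String × String))), Dom_extract_image_src_py img_tag → Spec_extract_image_src_py img_tag (extract_image_src_py img_tag)

-- ===== LEMMAS AND PROOFS =====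

-- Dict.get? over the raw association list is the first match, i.e. A's find?-based get
theorem pv_get_eq (d : List (String × String)) (k : String) :
    (PySem.Dict.mk d).get? k = pvDictGet d k := by
  induction d with
  | nil => rfl
  | cons p rest ih =>
    rw [PySem.Dict.get?_mk_cons, pvDictGet, List.find?]
    by_cases h : p.1 == k
    · simp [h]
    · simp only [h, Bool.false_eq_true, if_false, ih, pvDictGet]

-- the best-of-rest step used by the proofs (= pvBest's comparison on parsed pairs)
def pvCombine (c : Int × String) (r : Option (Int × String)) : Option (Int × String) :=
  match r with
  | none => some c
  | some b => if b.1 < c.1 ∨ (b.1 = c.1 ∧ b.2 ≤ c.2) then some c else some b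

-- pvBest on the parsed candidates
def pvBestC : List (Int × String) → Option (Int × String)
  | [] => none
  | c :: t => pvCombine c (pvBestC t)

theorem pv_best_filterMap (items : List String) :
    pvBest items = pvBestC (items.filterMap pvParse) := by
  induction items with
  | nil => rfl
  | cons x t ih =>
    rw [List.filterMap_cons]
    cases hx : pvParse x with
    | none => simp only [pvBest, hx, ih]
    | some c =>
      cases h : pvBestC (List.filterMap pvParse t) <;>
        simp only [pvBest, hx, ih, pvBestC, pvCombine, h]

-- A's append-accumulating loop builds filterMap
theorem pv_foldl_append_filterMap (xs : List String) (acc : List (Int × String)) :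
    xs.foldl (fun acc item => match pvParseItem item with | none => acc | some c => acc ++ [c]) acc
      = acc ++ xs.filterMap pvParseItem := by
  induction xs generalizing acc with
  | nil => simp
  | cons x t ih =>
    simp only [List.foldl_cons, List.filterMap_cons]
    cases pvParseItem x <;> simp [ih]

-- the running-best step of the insertion comparator
def pvStep {α : Type} (before : α → α → Bool) (b : Option α) (x : α) : Option α :=
  match b with
  | none => some x
  | some y => if before x y then some x else some y

-- head of an insertion-sort fold = running-best fold (any `before`, any start)
theorem pv_head_foldl_insertBy {α : Type} (before : α → α → Bool) (xs : List α) (acc : List α) :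
    (xs.foldl (fun a x => PySem.List.insertBy before x a) acc).head?
      = xs.foldl (pvStep before) acc.head? := by
  induction xs generalizing acc with
  | nil => rfl
  | cons x t ih =>
    simp only [List.foldl_cons]
    rw [ih]
    congr 1
    cases acc with
    | nil => rfl
    | cons y ys => simp [PySem.List.insertBy, pvStep]; split <;> rfl

-- sorted2's reverse `before` decides the strict lexicographic order
theorem pv_before_iff (x y : Int × String) :
    ((decide (y.1 < x.1) || (!decide (x.1 < y.1) && decide (y.2 < x.2))) = true)
      ↔ toLex y < toLex x := by
  rw [Prod.Lex.lt_iff]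
  simp only [ofLex_toLex]
  simp only [Bool.or_eq_true, Bool.and_eq_true, Bool.not_eq_true', decide_eq_true_iff,
    decide_eq_false_iff_not]
  constructor
  · rintro (h | ⟨h1, h2⟩)
    · exact Or.inl h
    · rcases lt_trichotomy y.1 x.1 with h' | h' | h'
      · exact Or.inl h'
      · exact Or.inr ⟨h', h2⟩
      · exact absurd h' h1
  · rintro (h | ⟨h1, h2⟩)
    · exact Or.inl h
    · exact Or.inr ⟨by rw [h1]; exact fun h => lt_irrefl _ h, h2⟩

theorem pv_combine_le_iff (c b : Int × String) :
    (b.1 < c.1 ∨ (b.1 = c.1 ∧ b.2 ≤ c.2)) ↔ toLex b ≤ toLex c := by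
  rw [Prod.Lex.le_iff]
  simp only [ofLex_toLex]

-- pvParse and pvParseItem are the same parser (both transliterate the same srcset-item parsing)
theorem pv_parse_eq : pvParse = pvParseItem := rfl

-- ordering helpers for the comparison steps
theorem pv_combine_lt (b0 x : Int × String) (r : Option (Int × String)) (h : toLex b0 < toLex x) :
    pvCombine x r = pvCombine b0 (pvCombine x r) := by
  cases r with
  | none =>
    simp only [pvCombine]
    rw [if_neg (fun hle => absurd ((pv_combine_le_iff b0 x).mp hle) (not_le.mpr h))]
  | some c =>
    simp only [pvCombine]
    by_cases hcx : toLex c ≤ toLex x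
    · rw [if_pos ((pv_combine_le_iff x c).mpr hcx)]
      dsimp only
      rw [if_neg (fun hle => absurd ((pv_combine_le_iff b0 x).mp hle) (not_le.mpr h))]
    · rw [if_neg (fun hle => hcx ((pv_combine_le_iff x c).mp hle))]
      dsimp only
      rw [if_neg (fun hle => hcx (((pv_combine_le_iff b0 c).mp hle).trans h.le))]

theorem pv_combine_ge (b0 x : Int × String) (r : Option (Int × String)) (h : ¬ toLex b0 < toLex x) :
    pvCombine b0 r = pvCombine b0 (pvCombine x r) := by
  have hxb : toLex x ≤ toLex b0 := not_lt.mp h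
  cases r with
  | none =>
    simp only [pvCombine]
    rw [if_pos ((pv_combine_le_iff b0 x).mpr hxb)]
  | some c =>
    simp only [pvCombine]
    by_cases hcx : toLex c ≤ toLex x
    · rw [if_pos ((pv_combine_le_iff x c).mpr hcx)]
      dsimp only
      rw [if_pos ((pv_combine_le_iff b0 x).mpr hxb), if_pos ((pv_combine_le_iff b0 c).mpr (hcx.trans hxb))]
    · rw [if_neg (fun hle => hcx ((pv_combine_le_iff x c).mp hle))]

-- the left running-best fold equals the right-recursive maximum
theorem pv_foldl_step_combine (before : Int × String → Int × String → Bool)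
    (hb : ∀ x y, before x y = true ↔ toLex y < toLex x)
    (t : List (Int × String)) (b0 : Int × String) :
    t.foldl (pvStep before) (some b0) = pvCombine b0 (pvBestC t) := by
  induction t generalizing b0 with
  | nil => rfl
  | cons x t ih =>
    rw [List.foldl_cons]
    dsimp only [pvStep]
    by_cases h : toLex b0 < toLex x
    · rw [if_pos ((hb x b0).mpr h), ih]
      simp only [pvBestC]
      exact pv_combine_lt b0 x _ h
    · rw [if_neg (fun hc => h ((hb x b0).mp hc)), ih]
      simp only [pvBestC]
      exact pv_combine_ge b0 x _ h

-- the whole srcset branch: A's build-sort-head = B's recursive maximum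
theorem pv_best_eq (items : List String) :
    (if (items.foldl (fun acc item => match pvParseItem item with | none => acc | some c => acc ++ [c]) ([] : List (Int × String))) = [] then (none : Option String)
     else
       match PySem.List.sorted2 (items.foldl (fun acc item => match pvParseItem item with | none => acc | some c => acc ++ [c]) ([] : List (Int × String))) Prod.fst Prod.snd true with
       | [] => (none : Option String)
       | (_, u) :: _ => some u)
      = (match pvBest items with | some best => some best.2 | none => none) := by
  rw [pv_foldl_append_filterMap, pv_best_filterMap, pv_parse_eq]
  simp only [List.nil_append]
  cases hcs : items.filterMap pvParseItem with
  | nil => simp [pvBestC]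
  | cons c0 t0 =>
    rw [if_neg (by simp)]
    have hsorted : PySem.List.sorted2 (c0 :: t0) Prod.fst Prod.snd true
        = (c0 :: t0).foldl (fun a x => PySem.List.insertBy
            (fun a b => decide (b.1 < a.1) || (!decide (a.1 < b.1) && decide (b.2 < a.2))) x a) [] := by
      simp [PySem.List.sorted2]
    have hmatch : (match PySem.List.sorted2 (c0 :: t0) Prod.fst Prod.snd true with
        | [] => (none : Option String)
        | (_, u) :: _ => some u)
        = (PySem.List.sorted2 (c0 :: t0) Prod.fst Prod.snd true).head?.map Prod.snd := by
      cases PySem.List.sorted2 (c0 :: t0) Prod.fst Prod.snd true with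
      | nil => rfl
      | cons c t => cases c; rfl
    rw [hmatch, hsorted,
      pv_head_foldl_insertBy (fun a b => decide (b.1 < a.1) || (!decide (a.1 < b.1) && decide (b.2 < a.2))) (c0 :: t0) []]
    rw [List.foldl_cons]
    show Option.map Prod.snd (t0.foldl (pvStep _) (pvStep _ none c0))
      = match pvBestC (c0 :: t0) with | some best => some best.2 | none => none
    rw [show pvStep (fun a b => decide (b.1 < a.1) || (!decide (a.1 < b.1) && decide (b.2 < a.2))) none c0 = some c0 from rfl]
    rw [pv_foldl_step_combine _ pv_before_iff t0 c0]
    simp only [pvBestC]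
    cases pvCombine c0 (pvBestC t0) <;> rfl

-- the attribute fall-through: A's loop = B's or-chain, for any continuation X
theorem pv_attr_eq (d : List (String × String)) (X : Option String) :
    (match pvFirstAttr d ["src", "data-src", "data-lazy-src"] with
     | some v => some v
     | none => X)
    = (if pvTruthy (pvOr (pvOr (pvDictGet d "src") (pvDictGet d "data-src")) (pvDictGet d "data-lazy-src")) then
         pvOr (pvOr (pvDictGet d "src") (pvDictGet d "data-src")) (pvDictGet d "data-lazy-src")
       else X) := by
  cases h1 : pvDictGet d "src" <;> cases h2 : pvDictGet d "data-src" <;> cases h3 : pvDictGet d "data-lazy-src" <;>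
    simp [pvFirstAttr, pvOr, pvTruthy, h1, h2, h3] <;> split_ifs <;> simp_all

-- ===== VERDICT (by name: the statement is the Claim_ definition above) =====
theorem extract_image_src_py_spec : Claim_equal_extract_image_src_py := by
  intro img _
  unfold Spec_extract_image_src_py
  cases img with
  | none => rfl
  | some d =>
    simp only [extract_image_src_py, extract_image_src_py_alt, pv_get_eq]
    rw [pv_attr_eq]
    congr 1
    cases hs : pvDictGet d "srcset" with
    | none => rfl
    | some srcset =>
      dsimp only
      by_cases h : srcset = ""
      · simp [h]
      · rw [if_neg h, if_neg h]
        exact pv_best_eq _
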